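-- pv_equiv track=rewrite | github.com/RobertCurry0216/AoC | 2018/day5.py | full_collapse
-- ===== SOURCE A (Python) =====
-- from string import ascii_lowercase as LC
--
-- def collapse(data):
--     l1 = len(data)
--     l2 = l1 + 1
--
--     while l1 != l2:
--         l2 = l1
--         for c in LC:
--             data = data.replace(c+c.upper(), '').replace(c.upper()+c, '')
--         l1 = len(data)
--     return len(data)
--
-- def full_collapse(data):
--     min_len = 20000
--     min_chr = 'a'
--     for c in LC:
--         data_improved = data.replace(c, '').replace(c.upper(), '')
--         length = collapse(data_improved)
--         if length < min_len:
--             min_len = length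
--             min_chr = c
--     return (min_len, min_chr)
-- ===== SOURCE B (Python) =====
-- from string import ascii_lowercase as LC
--
-- def full_collapse(data):
--     best_len, best_chr = 20000, 'a'
--     for c in LC:
--         C = c.upper()
--         stack = []
--         for ch in data:
--             if ch == c or ch == C:
--                 continue
--             if stack and stack[-1] != ch and stack[-1].lower() == ch.lower():
--                 stack.pop()
--             else:
--                 stack.append(ch)
--         if len(stack) < best_len:
--             best_len, best_chr = len(stack), c
--     return (best_len, best_chr)
-- ===== Notes on version B (the rewrite author's own statement) =====
-- stated objective: alternative
-- what changed: A collapses the polymer by repeatedly running 52 str.replace passes over the whole string until its length stops changing; B collapses it in a single pass with an explicit stack (push each unit, cancel it against the stack top when the cases mirror), done once per candidate letter with the removed letter filtered inline.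
import Mathlib
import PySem

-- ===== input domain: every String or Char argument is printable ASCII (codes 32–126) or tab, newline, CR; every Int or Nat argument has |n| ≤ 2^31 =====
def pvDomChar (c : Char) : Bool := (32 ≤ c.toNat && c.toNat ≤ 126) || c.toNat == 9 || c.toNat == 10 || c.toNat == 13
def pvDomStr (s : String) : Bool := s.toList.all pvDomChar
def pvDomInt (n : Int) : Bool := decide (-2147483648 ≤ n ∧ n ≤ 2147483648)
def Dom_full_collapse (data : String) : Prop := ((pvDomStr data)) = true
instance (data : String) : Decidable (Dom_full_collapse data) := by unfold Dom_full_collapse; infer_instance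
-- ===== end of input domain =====

-- B replaces A's repeated str.replace fixpoint collapse by a single-pass stack collapse per letter (alternative algorithm, same result).

-- ===== PORT A =====

-- ascii_lowercase (imported constant LC, shared by both programs)
def lcList : List Char := "abcdefghijklmnopqrstuvwxyz".toList

-- loop body of `collapse`'s inner `for c in LC` loop: data.replace(c+c.upper(),'').replace(c.upper()+c,'')
def stepRep (d : List Char) (c : Char) : List Char :=
  PySem.Chars.replace (PySem.Chars.replace d [c, PySem.Chars.upperChar c] [])
    [PySem.Chars.upperChar c, c] []

-- one full pass of the while-loop body
def passA (d : List Char) : List Char := List.foldl stepRep d lcList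

-- termination lemmas for the while loop (replacing a pattern by '' never grows the string)
theorem replace_go_len_le (old : List Char) (fuel : Nat) :
    ∀ (l acc : List Char), (PySem.Chars.replace.go old [] fuel l acc).length ≤ acc.length + l.length := by
  induction fuel with
  | zero => intro l acc; simp [PySem.Chars.replace.go]
  | succ fuel ih =>
    intro l acc
    cases l with
    | nil => simp [PySem.Chars.replace.go]
    | cons c t =>
      simp only [PySem.Chars.replace.go]
      split
      · have h := ih (List.drop old.length (c :: t)) acc
        simp only [List.reverse_nil, List.nil_append] at h ⊢
        have : (List.drop old.length (c :: t)).length ≤ (c :: t).length := by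
          simp [List.length_drop]
        omega
      · have h := ih t (c :: acc)
        simp only [List.length_cons] at h ⊢
        omega

theorem replace_pair_len_le (x y : Char) (s : List Char) :
    (PySem.Chars.replace s [x, y] []).length ≤ s.length := by
  have h := replace_go_len_le [x, y] s.length s []
  simpa [PySem.Chars.replace] using h

theorem stepRep_len_le (d : List Char) (c : Char) : (stepRep d c).length ≤ d.length := by
  have h1 := replace_pair_len_le c (PySem.Chars.upperChar c) d
  have h2 := replace_pair_len_le (PySem.Chars.upperChar c) c
    (PySem.Chars.replace d [c, PySem.Chars.upperChar c] [])
  simp only [stepRep]; omega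

theorem foldl_stepRep_len_le (cs : List Char) : ∀ d : List Char,
    (List.foldl stepRep d cs).length ≤ d.length := by
  induction cs with
  | nil => intro d; simp
  | cons c cs ih =>
    intro d
    have h1 := stepRep_len_le d c
    have h2 := ih (stepRep d c)
    simp only [List.foldl_cons]
    omega

theorem passA_len_le (d : List Char) : (passA d).length ≤ d.length :=
  foldl_stepRep_len_le lcList d

-- the `while l1 != l2` loop of `collapse` (runs one pass, repeats while the length changed)
def collapseGo (d : List Char) : List Char :=
  if (passA d).length = d.length then passA d else collapseGo (passA d)
termination_by d.length
decreasing_by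
  have := passA_len_le d
  omega

-- collapse(data): the final length
def collapse (d : List Char) : Int := ((collapseGo d).length : Int)

def full_collapse (data : String) : Int × String :=
  List.foldl
    (fun (acc : Int × String) c =>
      let data_improved :=
        PySem.Chars.replace (PySem.Chars.replace data.toList [c] []) [PySem.Chars.upperChar c] []
      let length := collapse data_improved
      if length < acc.1 then (length, String.ofList [c]) else acc)
    (20000, "a") lcList

-- ===== PORT B =====

-- stack[-1] != ch and stack[-1].lower() == ch.lower()
def mirChk (top ch : Char) : Bool :=
  top != ch && (PySem.Chars.lowerChar top == PySem.Chars.lowerChar ch)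

-- the if/else on the stack (stack top at the head)
def push (stack : List Char) (ch : Char) : List Char :=
  match stack with
  | [] => [ch]
  | top :: rest => if mirChk top ch then rest else ch :: top :: rest

-- inner loop body, including the `continue` filter on the removed letter
def pushSkip (c C : Char) (stack : List Char) (ch : Char) : List Char :=
  if ch == c || ch == C then stack else push stack ch

def full_collapse_alt (data : String) : Int × String :=
  List.foldl
    (fun (acc : Int × String) c =>
      let C := PySem.Chars.upperChar c
      let stack := List.foldl (pushSkip c C) [] data.toList
      if (stack.length : Int) < acc.1 then ((stack.length : Int), String.ofList [c]) else acc)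
    (20000, "a") lcList

-- ===== PRECONDITION & SPEC =====
def Spec_full_collapse (data : String) (out : Int × String) : Prop := out = full_collapse_alt data
instance (data : String) (out : Int × String) : Decidable (Spec_full_collapse data out) := by unfold Spec_full_collapse; infer_instance

-- ===== CLAIM (what is proved, stated in full; the proofs are below) =====
def Claim_equal_full_collapse : Prop := ∀ (data : String), Dom_full_collapse data → Spec_full_collapse data (full_collapse data)

-- ===== LEMMAS AND PROOFS =====

-- Char-level facts about the cancellation relation mirChk
theorem char_eq_of_toNat {a b : Char} (h : a.toNat = b.toNat) : a = b := by
  apply Char.ext; exact UInt32.toNat_inj.mp h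

theorem toNat_ofNat_small {n : Nat} (h : n < 55296) : (Char.ofNat n).toNat = n := by
  rw [Char.toNat_ofNat, if_pos (Or.inl h : Nat.isValidChar n)]

theorem isupper_iff (c : Char) : PySem.Chars.isupper c = true ↔ 65 ≤ c.toNat ∧ c.toNat ≤ 90 := by
  simp only [PySem.Chars.isupper, Bool.and_eq_true, decide_eq_true_eq, Char.le_def,
    UInt32.le_iff_toNat_le]
  exact Iff.rfl

theorem islower_iff (c : Char) : PySem.Chars.islower c = true ↔ 97 ≤ c.toNat ∧ c.toNat ≤ 122 := by
  simp only [PySem.Chars.islower, Bool.and_eq_true, decide_eq_true_eq, Char.le_def,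
    UInt32.le_iff_toNat_le]
  exact Iff.rfl

theorem mem_lc_ofNat (n : Nat) (h1 : 97 ≤ n) (h2 : n ≤ 122) : Char.ofNat n ∈ lcList := by
  interval_cases n <;> decide

theorem mem_lc (c : Char) (h1 : 97 ≤ c.toNat) (h2 : c.toNat ≤ 122) : c ∈ lcList := by
  have := mem_lc_ofNat c.toNat h1 h2
  rwa [Char.ofNat_toNat] at this

theorem beq_swap (x y : Char) : (x == y) = (y == x) := by
  by_cases h : x = y
  · subst h; rfl
  · simp [h, Ne.symm h]

theorem mir_symm (a b : Char) : mirChk a b = mirChk b a := by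
  unfold mirChk
  rw [bne, bne, beq_swap a b, beq_swap (PySem.Chars.lowerChar a) (PySem.Chars.lowerChar b)]

theorem lowerChar_eq (c : Char) : PySem.Chars.lowerChar c =
    if PySem.Chars.isupper c then Char.ofNat (c.toNat + 32) else c := rfl

theorem upperChar_eq (c : Char) : PySem.Chars.upperChar c =
    if PySem.Chars.islower c then Char.ofNat (c.toNat - 32) else c := rfl

theorem mir_pair {a b : Char} (h : mirChk a b = true) :
    ∃ c, c ∈ lcList ∧ ((a = c ∧ b = PySem.Chars.upperChar c) ∨ (a = PySem.Chars.upperChar c ∧ b = c)) := by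
  simp only [mirChk, Bool.and_eq_true, bne_iff_ne, beq_iff_eq] at h
  obtain ⟨hne, hlow⟩ := h
  rw [lowerChar_eq, lowerChar_eq] at hlow
  by_cases ha : PySem.Chars.isupper a = true <;> by_cases hb : PySem.Chars.isupper b = true
  · -- both uppercase: lowered chars equal forces a = b
    exfalso
    rw [if_pos ha, if_pos hb] at hlow
    obtain ⟨ha1, ha2⟩ := (isupper_iff a).mp ha
    obtain ⟨hb1, hb2⟩ := (isupper_iff b).mp hb
    have := congrArg Char.toNat hlow
    rw [toNat_ofNat_small (by omega), toNat_ofNat_small (by omega)] at this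
    exact hne (char_eq_of_toNat (by omega))
  · -- a uppercase, b lowercase: witness c = b
    rw [if_pos ha, if_neg hb] at hlow
    obtain ⟨ha1, ha2⟩ := (isupper_iff a).mp ha
    have hbn : b.toNat = a.toNat + 32 := by
      rw [← hlow, toNat_ofNat_small (by omega)]
    refine ⟨b, mem_lc b (by omega) (by omega), Or.inr ⟨?_, rfl⟩⟩
    rw [upperChar_eq, if_pos ((islower_iff b).mpr (by omega))]
    have : b.toNat - 32 = a.toNat := by omega
    rw [this, Char.ofNat_toNat]
  · -- a lowercase, b uppercase: witness c = a
    rw [if_neg ha, if_pos hb] at hlow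
    obtain ⟨hb1, hb2⟩ := (isupper_iff b).mp hb
    have han : a.toNat = b.toNat + 32 := by
      rw [hlow, toNat_ofNat_small (by omega)]
    refine ⟨a, mem_lc a (by omega) (by omega), Or.inl ⟨rfl, ?_⟩⟩
    rw [upperChar_eq, if_pos ((islower_iff a).mpr (by omega))]
    have : a.toNat - 32 = b.toNat := by omega
    rw [this, Char.ofNat_toNat]
  · -- neither uppercase: lower is the identity on both
    exfalso
    rw [if_neg ha, if_neg hb] at hlow
    exact hne hlow

theorem lc_range_all : (lcList.all fun c =>
    (97 ≤ c.toNat && c.toNat ≤ 122) && (PySem.Chars.upperChar c).toNat == c.toNat - 32) = true := by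
  decide

theorem lc_range : ∀ c ∈ lcList,
    (97 ≤ c.toNat ∧ c.toNat ≤ 122) ∧ (PySem.Chars.upperChar c).toNat = c.toNat - 32 := by
  have h := lc_range_all
  rw [List.all_eq_true] at h
  intro c hc
  simpa using h c hc

theorem mir_funlike {a b c : Char} (h1 : mirChk a b = true) (h2 : mirChk a c = true) : b = c := by
  obtain ⟨c1, hc1, hd1⟩ := mir_pair h1
  obtain ⟨c2, hc2, hd2⟩ := mir_pair h2
  obtain ⟨⟨hr1a, hr1b⟩, hu1⟩ := lc_range c1 hc1
  obtain ⟨⟨hr2a, hr2b⟩, hu2⟩ := lc_range c2 hc2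
  rcases hd1 with ⟨hb1a, hb1b⟩ | ⟨hb1a, hb1b⟩ <;> rcases hd2 with ⟨hb2a, hb2b⟩ | ⟨hb2a, hb2b⟩
  · rw [hb1b, hb2b, ← hb1a, ← hb2a]
  · exfalso
    have e1 := congrArg Char.toNat hb1a
    have e2 := congrArg Char.toNat hb2a
    omega
  · exfalso
    have e1 := congrArg Char.toNat hb1a
    have e2 := congrArg Char.toNat hb2a
    omega
  · have hc : c1.toNat = c2.toNat := by
      have := congrArg Char.toNat (hb1a.symm.trans hb2a)
      omega
    rw [hb1b, hb2b, char_eq_of_toNat hc]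

-- the stacks the fold produces carry no adjacent cancellable pair
def NoMir (l : List Char) : Prop := List.IsChain (fun a b => mirChk a b = false) l

theorem noMir_tail {a : Char} {l : List Char} (h : NoMir (a :: l)) : NoMir l := by
  cases l with
  | nil => exact List.IsChain.nil
  | cons b t => exact (List.isChain_cons_cons.mp h).2

theorem push_good {s : List Char} (ch : Char) (h : NoMir s) : NoMir (push s ch) := by
  cases s with
  | nil => exact List.isChain_singleton _
  | cons top rest =>
    simp only [push]
    split
    · exact noMir_tail h
    · rename_i hm
      refine List.isChain_cons_cons.mpr ⟨?_, h⟩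
      rw [mir_symm]; exact Bool.of_not_eq_true hm

theorem cancel_pair {s : List Char} {x y : Char} (hs : NoMir s) (hxy : mirChk x y = true) :
    push (push s x) y = s := by
  cases s with
  | nil => simp [push, hxy]
  | cons t r =>
    by_cases h : mirChk t x = true
    · have hxt : mirChk x t = true := by rw [mir_symm]; exact h
      have hyt : y = t := mir_funlike hxy hxt
      rw [hyt]
      simp only [push, if_pos h]
      cases r with
      | nil => rfl
      | cons h2 r2 =>
        have hth2 : mirChk t h2 = false := (List.isChain_cons_cons.mp hs).1
        have hh : mirChk h2 t = false := by rw [mir_symm]; exact hth2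
        simp [hh]
    · simp [push, h, hxy]

theorem foldl_cancel {s : List Char} {x y : Char} (v : List Char) (hs : NoMir s)
    (hxy : mirChk x y = true) : List.foldl push s (x :: y :: v) = List.foldl push s v := by
  simp only [List.foldl_cons, cancel_pair hs hxy]

-- the removal of non-overlapping occurrences of the two-char pattern [x,y], as str.replace performs it
def rem2 (x y : Char) : List Char → List Char
  | [] => []
  | [a] => [a]
  | a :: b :: t => if a = x ∧ b = y then rem2 x y t else a :: rem2 x y (b :: t)

theorem replace_go_pair (x y : Char) (fuel : Nat) :
    ∀ (l acc : List Char), l.length ≤ fuel →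
      PySem.Chars.replace.go [x, y] [] fuel l acc = acc.reverse ++ rem2 x y l := by
  induction fuel with
  | zero =>
    intro l acc hl
    have : l = [] := List.eq_nil_of_length_eq_zero (by omega)
    subst this
    simp [PySem.Chars.replace.go, rem2]
  | succ fuel ih =>
    intro l acc hl
    match l with
    | [] => simp [PySem.Chars.replace.go, rem2]
    | [c] =>
      have hpre : [x, y].isPrefixOf [c] = false := by simp [List.isPrefixOf]
      simp only [PySem.Chars.replace.go, hpre, Bool.false_eq_true, if_false]
      rw [ih [] (c :: acc) (by simp)]
      simp [rem2]
    | c :: b :: t =>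
      by_cases hcb : c = x ∧ b = y
      · obtain ⟨rfl, rfl⟩ := hcb
        have hpre : [c, b].isPrefixOf (c :: b :: t) = true := by simp [List.isPrefixOf]
        simp only [PySem.Chars.replace.go, hpre, if_true]
        rw [show List.drop [c, b].length (c :: b :: t) = t from rfl]
        rw [ih t ([].reverse ++ acc) (by simp at hl ⊢; omega)]
        simp [rem2]
      · have hpre : [x, y].isPrefixOf (c :: b :: t) = false := by
          rw [Bool.eq_false_iff]
          intro hh
          simp only [List.isPrefixOf, Bool.and_eq_true, beq_iff_eq, and_true] at hh
          exact hcb ⟨hh.1.symm, hh.2.symm⟩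
        simp only [PySem.Chars.replace.go, hpre, Bool.false_eq_true, if_false]
        rw [ih (b :: t) (c :: acc) (by simp at hl ⊢; omega)]
        rw [rem2, if_neg hcb]
        simp

theorem replace_pair_eq (x y : Char) (s : List Char) :
    PySem.Chars.replace s [x, y] [] = rem2 x y s := by
  have h := replace_go_pair x y s.length s [] le_rfl
  simpa [PySem.Chars.replace] using h

theorem replace_go_single (x : Char) (fuel : Nat) :
    ∀ (l acc : List Char), l.length ≤ fuel →
      PySem.Chars.replace.go [x] [] fuel l acc = acc.reverse ++ l.filter (fun ch => ch != x) := by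
  induction fuel with
  | zero =>
    intro l acc hl
    have : l = [] := List.eq_nil_of_length_eq_zero (by omega)
    subst this
    simp [PySem.Chars.replace.go]
  | succ fuel ih =>
    intro l acc hl
    match l with
    | [] => simp [PySem.Chars.replace.go]
    | c :: t =>
      by_cases hc : c = x
      · subst hc
        have hpre : [c].isPrefixOf (c :: t) = true := by simp [List.isPrefixOf]
        simp only [PySem.Chars.replace.go, hpre, if_true]
        rw [show List.drop [c].length (c :: t) = t from rfl]
        rw [ih t ([].reverse ++ acc) (by simp at hl ⊢; omega)]
        simp
      · have hpre : [x].isPrefixOf (c :: t) = false := by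
          rw [Bool.eq_false_iff]
          intro hh
          simp only [List.isPrefixOf, Bool.and_eq_true, beq_iff_eq, and_true] at hh
          exact hc hh.symm
        simp only [PySem.Chars.replace.go, hpre, Bool.false_eq_true, if_false]
        rw [ih t (c :: acc) (by simp at hl ⊢; omega)]
        have hcx : (c != x) = true := by simp [bne, hc]
        simp [hcx]

theorem replace_single_eq (x : Char) (s : List Char) :
    PySem.Chars.replace s [x] [] = s.filter (fun ch => ch != x) := by
  have h := replace_go_single x s.length s [] le_rfl
  simpa [PySem.Chars.replace] using h

theorem rem2_len_le (x y : Char) : ∀ l : List Char, (rem2 x y l).length ≤ l.length := by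
  intro l
  fun_induction rem2 x y l with
  | case1 => simp
  | case2 a => simp
  | case3 a b t hab ih => simp only [List.length_cons]; omega
  | case4 a b t hab ih => simp only [List.length_cons] at ih ⊢; omega

theorem rem2_eq_or_lt (x y : Char) : ∀ l : List Char,
    rem2 x y l = l ∨ (rem2 x y l).length < l.length := by
  intro l
  fun_induction rem2 x y l with
  | case1 => exact Or.inl rfl
  | case2 a => exact Or.inl rfl
  | case3 a b t hab ih =>
    right
    have := rem2_len_le x y t
    simp only [List.length_cons]
    omega
  | case4 a b t hab ih =>
    rcases ih with h | h
    · exact Or.inl (by rw [h])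
    · right
      simp only [List.length_cons] at h ⊢
      omega

theorem rem2_eq_self_of_len {x y : Char} {l : List Char}
    (h : (rem2 x y l).length = l.length) : rem2 x y l = l := by
  rcases rem2_eq_or_lt x y l with h2 | h2
  · exact h2
  · omega

theorem rem2_self_chain {x y : Char} : (l : List Char) → rem2 x y l = l →
    List.IsChain (fun p q => ¬(p = x ∧ q = y)) l
  | [], _ => List.IsChain.nil
  | [a], _ => List.isChain_singleton a
  | a :: b :: t, h => by
    by_cases hab : a = x ∧ b = y
    · exfalso
      rw [rem2, if_pos hab] at h
      have := rem2_len_le x y t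
      have := congrArg List.length h
      simp only [List.length_cons] at this
      omega
    · rw [rem2, if_neg hab] at h
      have h2 : rem2 x y (b :: t) = b :: t := by
        have := List.cons.injEq a (rem2 x y (b :: t)) a (b :: t) ▸ h
        exact (List.cons.inj h).2
      exact List.isChain_cons_cons.mpr ⟨hab, rem2_self_chain (b :: t) h2⟩

theorem rem2_sc {x y : Char} (hxy : mirChk x y = true) : (l : List Char) → ∀ s, NoMir s →
    List.foldl push s (rem2 x y l) = List.foldl push s l
  | [], _, _ => rfl
  | [a], _, _ => rfl
  | a :: b :: t, s, hs => by
    by_cases hab : a = x ∧ b = y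
    · rw [rem2, if_pos hab]
      rw [rem2_sc hxy t s hs]
      obtain ⟨rfl, rfl⟩ := hab
      exact (foldl_cancel t hs hxy).symm
    · rw [rem2, if_neg hab]
      simp only [List.foldl_cons]
      exact rem2_sc hxy (b :: t) (push s a) (push_good a hs)

theorem stepRep_eq_rem2 (d : List Char) (c : Char) :
    stepRep d c = rem2 (PySem.Chars.upperChar c) c (rem2 c (PySem.Chars.upperChar c) d) := by
  simp only [stepRep, replace_pair_eq]

theorem lc_mir_all : (lcList.all fun c =>
    mirChk c (PySem.Chars.upperChar c) && mirChk (PySem.Chars.upperChar c) c) = true := by decide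

theorem lc_mir : ∀ c ∈ lcList, mirChk c (PySem.Chars.upperChar c) = true ∧
    mirChk (PySem.Chars.upperChar c) c = true := by
  have h := lc_mir_all
  rw [List.all_eq_true] at h
  intro c hc
  simpa using h c hc

theorem stepRep_sc {c : Char} (hc : c ∈ lcList) (d : List Char) {s : List Char} (hs : NoMir s) :
    List.foldl push s (stepRep d c) = List.foldl push s d := by
  obtain ⟨h1, h2⟩ := lc_mir c hc
  rw [stepRep_eq_rem2, rem2_sc h2 _ _ hs, rem2_sc h1 _ _ hs]

theorem pass_sc_aux (cs : List Char) (hcs : ∀ c ∈ cs, c ∈ lcList) : ∀ (d s : List Char), NoMir s →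
    List.foldl push s (List.foldl stepRep d cs) = List.foldl push s d := by
  induction cs with
  | nil => intro d s _; rfl
  | cons c cs ih =>
    intro d s hs
    simp only [List.foldl_cons]
    rw [ih (fun c' hc' => hcs c' (List.mem_cons_of_mem _ hc')) (stepRep d c) s hs,
      stepRep_sc (hcs c List.mem_cons_self) d hs]

theorem pass_sc (d : List Char) : List.foldl push [] (passA d) = List.foldl push [] d :=
  pass_sc_aux lcList (fun _ h => h) d [] List.IsChain.nil

theorem stepRep_eq_self_of_len {d : List Char} {c : Char} (h : (stepRep d c).length = d.length) :
    stepRep d c = d := by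
  rw [stepRep_eq_rem2] at h ⊢
  have h1 := rem2_len_le c (PySem.Chars.upperChar c) d
  have h2 := rem2_len_le (PySem.Chars.upperChar c) c (rem2 c (PySem.Chars.upperChar c) d)
  have hinner : rem2 c (PySem.Chars.upperChar c) d = d := rem2_eq_self_of_len (by omega)
  rw [hinner] at h ⊢
  exact rem2_eq_self_of_len (by omega)

theorem foldl_fix (cs : List Char) : ∀ d : List Char,
    (List.foldl stepRep d cs).length = d.length →
    List.foldl stepRep d cs = d ∧ ∀ c ∈ cs, stepRep d c = d := by
  induction cs with
  | nil => intro d _; exact ⟨rfl, by simp⟩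
  | cons c cs ih =>
    intro d hlen
    simp only [List.foldl_cons] at hlen ⊢
    have h1 := stepRep_len_le d c
    have h2 := foldl_stepRep_len_le cs (stepRep d c)
    have hd1 : stepRep d c = d := stepRep_eq_self_of_len (by omega)
    rw [hd1] at hlen ⊢
    obtain ⟨hfix, hall⟩ := ih d hlen
    refine ⟨hfix, ?_⟩
    intro c' hc'
    rcases List.mem_cons.mp hc' with rfl | hc'
    · exact hd1
    · exact hall c' hc' 

theorem fix_rem2 {d : List Char} {c : Char} (h : stepRep d c = d) :
    rem2 c (PySem.Chars.upperChar c) d = d ∧ rem2 (PySem.Chars.upperChar c) c d = d := by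
  rw [stepRep_eq_rem2] at h
  have h1 := rem2_len_le c (PySem.Chars.upperChar c) d
  have h2 := rem2_len_le (PySem.Chars.upperChar c) c (rem2 c (PySem.Chars.upperChar c) d)
  have hlen := congrArg List.length h
  have hinner : rem2 c (PySem.Chars.upperChar c) d = d := rem2_eq_self_of_len (by omega)
  rw [hinner] at h
  exact ⟨hinner, h⟩

theorem fix_noMir {d : List Char} (h : ∀ c ∈ lcList, stepRep d c = d) : NoMir d := by
  rw [NoMir, List.isChain_iff_getElem]
  intro i hi
  by_contra hmir
  rw [Bool.not_eq_false] at hmir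
  obtain ⟨c, hc, hcase⟩ := mir_pair hmir
  obtain ⟨h1, h2⟩ := fix_rem2 (h c hc)
  rcases hcase with ⟨ha, hb⟩ | ⟨ha, hb⟩
  · have hchain := rem2_self_chain d h1
    rw [List.isChain_iff_getElem] at hchain
    exact hchain i hi ⟨ha, hb⟩
  · have hchain := rem2_self_chain d h2
    rw [List.isChain_iff_getElem] at hchain
    exact hchain i hi ⟨ha, hb⟩

theorem scan : (l : List Char) → ∀ s : List Char, NoMir l →
    (∀ h a, s.head? = some h → l.head? = some a → mirChk h a = false) →
    List.foldl push s l = l.reverse ++ s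
  | [], s, _, _ => by simp
  | ch :: t, s, hl, hb => by
    have hstep : push s ch = ch :: s := by
      cases s with
      | nil => rfl
      | cons h r =>
        have := hb h ch rfl rfl
        simp [push, this]
    simp only [List.foldl_cons, hstep]
    have ht : NoMir t := noMir_tail hl
    have hb' : ∀ h a, (ch :: s).head? = some h → t.head? = some a → mirChk h a = false := by
      intro h a hh ha
      cases t with
      | nil => simp at ha
      | cons b t2 =>
        simp only [List.head?_cons, Option.some.injEq] at hh ha
        subst hh; subst ha
        exact (List.isChain_cons_cons.mp hl).1
    rw [scan t (ch :: s) ht hb']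
    simp

theorem collapseGo_len (d : List Char) :
    (collapseGo d).length = (List.foldl push [] d).length := by
  fun_induction collapseGo d with
  | case1 d h =>
    simp only [passA] at h
    obtain ⟨hfix, hall⟩ := foldl_fix lcList d h
    have hnm := fix_noMir hall
    have hs := scan d [] hnm (by intro h a hh _; simp at hh)
    rw [hs]
    simpa [passA] using h
  | case2 d h ih =>
    rw [ih, pass_sc d]

theorem pushSkip_filter (c C : Char) : ∀ (d s : List Char),
    List.foldl (pushSkip c C) s d =
      List.foldl push s (d.filter (fun ch => !(ch == c || ch == C))) := by
  intro d
  induction d with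
  | nil => intro s; rfl
  | cons ch t ih =>
    intro s
    by_cases h : (ch == c || ch == C) = true
    · simp only [List.foldl_cons, pushSkip, h, if_true, List.filter_cons]
      rw [if_neg (by simp_all)]
      exact ih s
    · simp only [List.foldl_cons, pushSkip, h, Bool.false_eq_true, if_false, List.filter_cons]
      rw [if_pos (by simp_all)]
      simp only [List.foldl_cons]
      exact ih (push s ch)

theorem per_letter (data : String) (c : Char) :
    collapse (PySem.Chars.replace (PySem.Chars.replace data.toList [c] [])
        [PySem.Chars.upperChar c] []) =
      ((List.foldl (pushSkip c (PySem.Chars.upperChar c)) [] data.toList).length : Int) := by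
  rw [replace_single_eq, replace_single_eq, List.filter_filter,
    pushSkip_filter c (PySem.Chars.upperChar c) data.toList []]
  have hpred : (fun ch => (ch != PySem.Chars.upperChar c && ch != c)) =
      (fun ch => !(ch == c || ch == PySem.Chars.upperChar c)) := by
    funext ch
    cases h1 : ch == c <;> cases h2 : ch == PySem.Chars.upperChar c <;> simp [bne, h1, h2]
  rw [hpred]
  simp [collapse, collapseGo_len]

-- ===== VERDICT (by name: the statement is the Claim_ definition above) =====
theorem full_collapse_spec : Claim_equal_full_collapse := by
  intro data _
  unfold Spec_full_collapse full_collapse full_collapse_alt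
  apply PySem.List.foldl_congr_mem
  intro acc c _
  dsimp only
  rw [per_letter data c]
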